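-- pv_equiv track=rewrite | github.com/pig-games/MFORTH | tools/tass_to_asm485/convert_mforth_to_asm485.py | split_comment
-- ===== SOURCE A (Python) =====
-- def is_escaped(text: str, idx: int) -> bool:
--     backslashes = 0
--     j = idx - 1
--     while j >= 0 and text[j] == "\\":
--         backslashes += 1
--         j -= 1
--     return (backslashes % 2) == 1
--
-- def split_comment(line: str) -> tuple[str, str]:
--     in_double = False
--     in_single = False
--     for i, ch in enumerate(line):
--         if ch == '"' and not in_single and not is_escaped(line, i):
--             in_double = not in_double
--         elif ch == "'" and not in_double and not is_escaped(line, i):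
--             in_single = not in_single
--         if ch == ';' and not in_double and not in_single:
--             return line[:i], line[i:]
--     return line, ""
-- ===== SOURCE B (Python) =====
-- def split_comment(line: str) -> tuple[str, str]:
--     cut = len(line)
--     state = 0  # 0 = outside quotes, 1 = in double quotes, 2 = in single quotes
--     esc = False  # current char is escaped (odd run of backslashes just before it)
--     for i, ch in enumerate(line):
--         if ch == ';' and state == 0:
--             cut = i
--             break
--         if ch == '"' and state != 2 and not esc:
--             state ^= 1
--         elif ch == "'" and state != 1 and not esc:
--             state ^= 2
--         esc = ch == '\\' and not esc
--     return line[:cut], line[cut:]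
-- ===== Notes on version B (the rewrite author's own statement) =====
-- stated objective: alternative
-- what changed: B is a single forward-pass automaton: an integer quote-state (0/1/2) plus an escaped flag replace A's two booleans and its backward is_escaped rescan at every quote; B first computes the cut index (defaulting to len(line)) and slices once at the end instead of returning from inside the loop.
import Mathlib
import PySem

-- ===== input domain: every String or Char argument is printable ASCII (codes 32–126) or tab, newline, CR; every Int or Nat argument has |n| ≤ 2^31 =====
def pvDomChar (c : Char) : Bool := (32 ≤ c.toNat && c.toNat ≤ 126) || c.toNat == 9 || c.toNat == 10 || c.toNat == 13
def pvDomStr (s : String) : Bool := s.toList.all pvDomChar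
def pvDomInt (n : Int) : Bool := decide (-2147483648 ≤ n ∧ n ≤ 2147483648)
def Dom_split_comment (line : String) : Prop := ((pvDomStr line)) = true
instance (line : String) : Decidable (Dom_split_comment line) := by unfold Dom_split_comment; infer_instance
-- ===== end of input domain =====

-- B replaces A's two-boolean loop with backward escaped-check rescans by a single
-- forward automaton (integer quote-state + escaped flag) that computes the cut index
-- and slices once at the end (objective: alternative).


-- ===== PORT A =====
-- A's is_escaped: scan backward from idx-1 counting backslashes.
def bsAux (cs : List Char) (j : Int) (acc : Nat) : Nat :=
  if h : 0 ≤ j ∧ PySem.List.pyGet? cs j = some '\\' then bsAux cs (j - 1) (acc + 1) else acc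
termination_by (j + 1).toNat
decreasing_by omega

def is_escaped (text : String) (idx : Int) : Bool :=
  bsAux text.toList (idx - 1) 0 % 2 == 1

def splitAAux (line : String) (cs : List Char) (i : Nat) (in_double in_single : Bool) :
    String × String :=
  match cs with
  | [] => (line, "")
  | ch :: rest =>
    let st :=
      if ch == '"' && !in_single && !is_escaped line (i : Int) then (!in_double, in_single)
      else if ch == '\'' && !in_double && !is_escaped line (i : Int) then (in_double, !in_single)
      else (in_double, in_single)
    if ch == ';' && !st.1 && !st.2 then
      (String.ofList (PySem.List.slice line.toList none (some (i : Int))),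
       String.ofList (PySem.List.slice line.toList (some (i : Int)) none))
    else splitAAux line rest (i + 1) st.1 st.2

def split_comment (line : String) : String × String :=
  splitAAux line line.toList 0 false false

-- ===== PORT B =====
-- B: compute the cut index with a forward automaton; state 0/1/2, esc = escaped flag.
def cutIdx (cs : List Char) (i : Nat) (state : Nat) (esc : Bool) (dflt : Nat) : Nat :=
  match cs with
  | [] => dflt
  | ch :: rest =>
    if ch == ';' && state == 0 then i
    else
      let state' :=
        if ch == '"' && !(state == 2) && !esc then state ^^^ 1
        else if ch == '\'' && !(state == 1) && !esc then state ^^^ 2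
        else state
      cutIdx rest (i + 1) state' (ch == '\\' && !esc) dflt

def split_comment_alt (line : String) : String × String :=
  let k := cutIdx line.toList 0 0 false line.toList.length
  (String.ofList (PySem.List.slice line.toList none (some (k : Int))),
   String.ofList (PySem.List.slice line.toList (some (k : Int)) none))

-- ===== PRECONDITION & SPEC =====
def Spec_split_comment (line : String) (out : String × String) : Prop := out = split_comment_alt line
instance (line : String) (out : String × String) : Decidable (Spec_split_comment line out) := by unfold Spec_split_comment; infer_instance

-- ===== CLAIM (what is proved, stated in full; the proofs are below) =====
def Claim_equal_split_comment : Prop := ∀ (line : String), Dom_split_comment line → Spec_split_comment line (split_comment line)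

-- ===== LEMMAS AND PROOFS =====

-- the escaped flag B maintains, as a function of the already-consumed prefix
def tb (p : List Char) : Bool := p.foldl (fun b c => c == '\\' && !b) false

theorem tb_append (p : List Char) (c : Char) :
    tb (p ++ [c]) = (c == '\\' && !tb p) := by
  simp [tb, List.foldl_append]

-- the run-length count A's bsAux computes, as a function of the prefix
def tn (p : List Char) : Nat := p.foldl (fun b c => if c == '\\' then b + 1 else 0) 0

theorem tn_append (p : List Char) (c : Char) :
    tn (p ++ [c]) = if c == '\\' then tn p + 1 else 0 := by
  simp [tn, List.foldl_append]

theorem tb_eq_tn_parity (p : List Char) : tb p = (tn p % 2 == 1) := by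
  induction p using List.reverseRecOn with
  | nil => simp [tb, tn]
  | append_singleton q c ih =>
    rw [tb_append, tn_append, ih]
    by_cases hc : c = '\\'
    · subst hc
      rcases Nat.mod_two_eq_zero_or_one (tn q) with h2 | h2 <;>
        simp [Nat.add_mod, h2]
    · simp [hc]

theorem bsAux_prefix (rest p : List Char) (line : String) (acc : Nat)
    (h : line.toList = p ++ rest) :
    bsAux line.toList ((p.length : Int) - 1) acc = acc + tn p := by
  induction p using List.reverseRecOn generalizing rest acc with
  | nil =>
    rw [bsAux]
    simp [tn]
  | append_singleton q c ih =>
    have hq : line.toList = q ++ (c :: rest) := by simpa using h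
    have hget : PySem.List.pyGet? line.toList ((q.length + 1 : Int) - 1) = some c := by
      have : ((q.length + 1 : Int) - 1) = ((q.length : Nat) : Int) := by ring
      rw [this, PySem.List.pyGet?_natCast, hq]
      simp
    rw [bsAux]
    by_cases hc : c = '\\'
    · subst hc
      rw [dif_pos]
      · have : ((q.length + 1 : Int) - 1 - 1) = ((q.length : Int) - 1) := by ring
        rw [show ((q ++ ['\\']).length : Int) - 1 = (q.length + 1 : Int) - 1 by simp]
        rw [this, ih (rest := '\\' :: rest) (acc := acc + 1) hq, tn_append]
        split_ifs with hif
        · omega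
        · exact absurd rfl hif
      · refine ⟨by simp, ?_⟩
        simpa using hget
    · rw [dif_neg]
      · simp [tn_append, hc]
      · rw [show ((q ++ [c]).length : Int) - 1 = (q.length + 1 : Int) - 1 by simp]
        rw [hget]
        simp [hc]

theorem is_escaped_eq (line : String) (p rest : List Char) (h : line.toList = p ++ rest) :
    is_escaped line (p.length : Int) = tb p := by
  unfold is_escaped
  rw [bsAux_prefix rest p line 0 h, tb_eq_tn_parity]
  simp

-- encoding of A's two booleans as B's state
def stEnc (d s : Bool) : Nat := if d then 1 else if s then 2 else 0

theorem stEnc_step (ch : Char) (d s d' s' esc : Bool)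
    (hds : ¬(d = true ∧ s = true))
    (hst : (if ch == '"' && !s && !esc then (!d, s)
        else if ch == '\'' && !d && !esc then (d, !s) else (d, s)) = (d', s')) :
    ¬(d' = true ∧ s' = true) ∧
      stEnc d' s' = (if ch == '"' && !(stEnc d s == 2) && !esc then stEnc d s ^^^ 1
        else if ch == '\'' && !(stEnc d s == 1) && !esc then stEnc d s ^^^ 2
        else stEnc d s) := by
  rcases d <;> rcases s <;> rcases esc <;>
    by_cases h1 : ch = '"' <;> by_cases h2 : ch = '\'' <;>
      simp_all [stEnc]

theorem semi_state (d s : Bool) : (!d && !s) = (stEnc d s == 0) := by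
  cases d <;> cases s <;> rfl

theorem aux_eq (rest : List Char) (line : String) (p : List Char) (d s : Bool)
    (h : line.toList = p ++ rest) (hds : ¬(d = true ∧ s = true)) :
    splitAAux line rest p.length d s =
      (String.ofList (PySem.List.slice line.toList none
          (some ((cutIdx rest p.length (stEnc d s) (tb p) line.toList.length : Nat) : Int))),
       String.ofList (PySem.List.slice line.toList
          (some ((cutIdx rest p.length (stEnc d s) (tb p) line.toList.length : Nat) : Int)) none)) := by
  induction rest generalizing p d s with
  | nil =>
    rw [splitAAux, cutIdx, PySem.List.slice_to_natCast, PySem.List.slice_from_natCast,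
        List.take_length, List.drop_length, String.ofList_toList]
  | cons ch rest ih =>
    have h' : line.toList = (p ++ [ch]) ++ rest := by simpa using h
    have hlen : (p ++ [ch]).length = p.length + 1 := by simp
    rw [splitAAux, cutIdx, is_escaped_eq line p (ch :: rest) h]
    by_cases hsemi : ch = ';'
    · subst hsemi
      simp only [show (';' == '"') = false from rfl, show (';' == '\'') = false from rfl,
        show (';' == ';') = true from rfl, Bool.false_and, Bool.true_and,
        Bool.false_eq_true, if_false]
      rw [semi_state d s]
      cases hc : (stEnc d s == 0) with
      | true => simp
      | false =>
        simp only [if_false, Bool.false_eq_true]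
        have hrec := ih (p := p ++ [';']) d s h' hds
        rw [hlen, tb_append] at hrec
        simpa using hrec
    · have hne : (ch == ';') = false := by simp [hsemi]
      simp only [hne, Bool.false_and, Bool.false_eq_true, if_false]
      cases hstA : (if ch == '"' && !s && !(tb p) then (!d, s)
          else if ch == '\'' && !d && !(tb p) then (d, !s) else (d, s)) with
      | mk d' s' =>
        obtain ⟨hds', henc⟩ := stEnc_step ch d s d' s' (tb p) hds hstA
        have hrec := ih (p := p ++ [ch]) d' s' h' hds'
        rw [hlen, tb_append] at hrec
        rw [← henc]
        exact hrec

-- ===== VERDICT (by name: the statement is the Claim_ definition above) =====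
theorem split_comment_spec : Claim_equal_split_comment := by
  intro line _
  unfold Spec_split_comment split_comment split_comment_alt
  have := aux_eq line.toList line [] false false (by simp) (by simp)
  simpa [tb, stEnc] using this
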